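-- pv_equiv track=rewrite | github.com/mikeiioo/IRobotics3-Labs- | closestSensor.py | findClosestSensor
-- ===== SOURCE A (Python) =====
-- def findClosestSensor(readings):
--     max_reading = -1
--     sensorIndex = -1
--
--     for i in range(len(readings)):
--         if readings[i] >= 20:
--             if readings[i] > max_reading:
--                 max_reading = readings[i]
--                 sensorIndex = i
--
--     return sensorIndex
-- ===== SOURCE B (Python) =====
-- def findClosestSensor(readings):
--     qualifying = [r for r in readings if r >= 20]
--     if not qualifying:
--         return -1
--     return readings.index(max(qualifying))
-- ===== Notes on version B (the rewrite author's own statement) =====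
-- stated objective: simpler
-- what changed: Replaces the single guarded scan that maintains a running max and its index with a filter-then-max pass followed by a separate first-index lookup (list.index).
import Mathlib
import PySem

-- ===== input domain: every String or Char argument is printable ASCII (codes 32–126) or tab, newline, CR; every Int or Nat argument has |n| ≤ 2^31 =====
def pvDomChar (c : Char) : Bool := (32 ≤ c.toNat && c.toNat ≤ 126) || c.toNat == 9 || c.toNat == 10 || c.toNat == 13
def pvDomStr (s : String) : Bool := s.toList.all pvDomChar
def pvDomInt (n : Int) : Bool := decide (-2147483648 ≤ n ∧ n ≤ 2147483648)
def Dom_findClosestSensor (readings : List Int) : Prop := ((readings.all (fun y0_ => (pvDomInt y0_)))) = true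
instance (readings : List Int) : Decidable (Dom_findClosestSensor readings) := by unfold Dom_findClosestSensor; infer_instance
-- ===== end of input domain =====

-- B replaces A's single guarded scan (running max + index) with filter-then-max and a
-- separate first-index lookup; objective: simpler.

-- ===== PORT A =====
-- for i in range(len(readings)): readings[i] is in range, so pyGetD is exact here
def findClosestSensor (readings : List Int) : Int :=
  ((PySem.List.pyRange 0 (PySem.List.len readings) 1).foldl
    (fun (st : Int × Int) i =>
      let r := PySem.List.pyGetD readings i 0
      if r ≥ 20 then (if r > st.1 then (r, i) else st) else st)
    (-1, -1)).2

-- ===== PORT B =====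
def findClosestSensor_alt (readings : List Int) : Int :=
  let qualifying := readings.filter (fun r => r ≥ 20)
  if qualifying = [] then -1
  else
    match PySem.List.max? qualifying (fun r => r) with
    | none => -1
    | some m =>
      match PySem.List.index? readings m with
      | some k => (k : Int)
      | none => -1

-- ===== PRECONDITION & SPEC =====
def Spec_findClosestSensor (readings : List Int) (out : Int) : Prop := out = findClosestSensor_alt readings
instance (readings : List Int) (out : Int) : Decidable (Spec_findClosestSensor readings out) := by unfold Spec_findClosestSensor; infer_instance

-- ===== CLAIM (what is proved, stated in full; the proofs are below) =====
def Claim_equal_findClosestSensor : Prop := ∀ (readings : List Int), Dom_findClosestSensor readings → Spec_findClosestSensor readings (findClosestSensor readings)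

-- ===== LEMMAS AND PROOFS =====

-- A's loop body, as a step over (index, value) pairs
def pvStep (st : Int × Int) (p : Int × Int) : Int × Int :=
  if p.2 ≥ 20 then (if p.2 > st.1 then (p.2, p.1) else st) else st

-- if nothing qualifies, the loop leaves the state alone
theorem pvLoopNone (xs : List Int) (s m idx : Int) (h : ∀ y ∈ xs, ¬ (20 ≤ y)) :
    (PySem.List.enumerate xs s).foldl pvStep (m, idx) = (m, idx) := by
  induction xs generalizing s with
  | nil => simp [PySem.List.enumerate_nil]
  | cons x xs ih =>
    rw [PySem.List.enumerate_cons, List.foldl_cons]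
    have hx : ¬ (20 ≤ x) := h x (by simp)
    simp only [pvStep, ge_iff_le, if_neg hx]
    exact ih (s + 1) fun y hy => h y (by simp [hy])

-- once the state holds an upper bound of every qualifying element, nothing changes
theorem pvLoopDone (xs : List Int) (s M idx : Int) (hmax : ∀ y ∈ xs, 20 ≤ y → y ≤ M) :
    (PySem.List.enumerate xs s).foldl pvStep (M, idx) = (M, idx) := by
  induction xs generalizing s with
  | nil => simp [PySem.List.enumerate_nil]
  | cons x xs ih =>
    rw [PySem.List.enumerate_cons, List.foldl_cons]
    have hstep : pvStep (M, idx) (s, x) = (M, idx) := by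
      simp only [pvStep, ge_iff_le]
      by_cases hx : 20 ≤ x
      · have : ¬ (x > M) := not_lt.mpr (hmax x (by simp) hx)
        simp [hx, this]
      · simp [hx]
    rw [hstep]
    exact ih (s + 1) fun y hy hy20 => hmax y (by simp [hy]) hy20

-- the loop lands on the first index of the qualifying maximum M
theorem pvLoopMain (xs : List Int) (s m idx M : Int) (k : Nat)
    (hM20 : 20 ≤ M) (hMm : m < M)
    (hidx : PySem.List.index? xs M = some k)
    (hmax : ∀ y ∈ xs, 20 ≤ y → y ≤ M) :
    (PySem.List.enumerate xs s).foldl pvStep (m, idx) = (M, s + k) := by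
  induction xs generalizing s m idx k with
  | nil => simp [PySem.List.index?] at hidx
  | cons x xs ih =>
    rw [PySem.List.enumerate_cons, List.foldl_cons]
    by_cases hxM : x = M
    · subst hxM
      rw [PySem.List.index?_cons_self] at hidx
      have hk : k = 0 := by simpa using hidx.symm
      subst hk
      have hstep : pvStep (m, idx) (s, x) = (x, s) := by
        simp [pvStep, hM20, hMm]
      rw [hstep]
      have := pvLoopDone xs (s + 1) x s fun y hy hy20 => hmax y (by simp [hy]) hy20
      simpa using this
    · rw [PySem.List.index?_cons_of_ne xs hxM] at hidx
      obtain ⟨k', hk', rfl⟩ : ∃ k', PySem.List.index? xs M = some k' ∧ k' + 1 = k := by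
        cases h : PySem.List.index? xs M with
        | none => rw [h] at hidx; simp at hidx
        | some k' => rw [h] at hidx; exact ⟨k', rfl, by simpa using hidx⟩
      have hmax' : ∀ y ∈ xs, 20 ≤ y → y ≤ M := fun y hy => hmax y (by simp [hy])
      by_cases hx20 : 20 ≤ x
      · have hxlt : x < M := lt_of_le_of_ne (hmax x (by simp) hx20) hxM
        by_cases hxm : m < x
        · have hstep : pvStep (m, idx) (s, x) = (x, s) := by simp [pvStep, hx20, hxm]
          rw [hstep, ih (s + 1) x s k' hxlt hk' hmax']
          exact Prod.ext rfl (by push_cast; ring)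
        · have hstep : pvStep (m, idx) (s, x) = (m, idx) := by
            simp [pvStep, hx20, not_lt.mp (by simpa using hxm)]
          rw [hstep, ih (s + 1) m idx k' hMm hk' hmax']
          exact Prod.ext rfl (by push_cast; ring)
      · have hstep : pvStep (m, idx) (s, x) = (m, idx) := by simp [pvStep, hx20]
        rw [hstep, ih (s + 1) m idx k' hMm hk' hmax']
        exact Prod.ext rfl (by push_cast; ring)

-- A's pyRange-over-indices fold is the fold of pvStep over the enumeration
theorem pvA_eq_enum (readings : List Int) :
    findClosestSensor readings =
      ((PySem.List.enumerate readings 0).foldl pvStep (-1, -1)).2 := by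
  unfold findClosestSensor
  rw [PySem.List.enumerate_eq_map_pyRange (d := 0), List.foldl_map]
  rfl

-- ===== VERDICT (by name: the statement is the Claim_ definition above) =====
theorem findClosestSensor_spec : Claim_equal_findClosestSensor := by
  intro readings _
  unfold Spec_findClosestSensor findClosestSensor_alt
  rw [pvA_eq_enum]
  by_cases hq : readings.filter (fun r => r ≥ 20) = []
  · have hnone : ∀ y ∈ readings, ¬ (20 ≤ y) := by
      intro y hy h20
      have : y ∈ readings.filter (fun r => r ≥ 20) := by
        simp [List.mem_filter, hy, h20]
      simp [hq] at this
    rw [pvLoopNone readings 0 (-1) (-1) hnone]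
    simp [hq]
  · cases hmx : PySem.List.max? (readings.filter (fun r => r ≥ 20)) (fun r => r) with
    | none => exact absurd ((PySem.List.max?_eq_none_iff _ _).mp hmx) hq
    | some M =>
      have hMmem : M ∈ readings.filter (fun r => r ≥ 20) := PySem.List.max?_mem hmx
      have hM20 : 20 ≤ M := by
        have := (List.mem_filter.mp hMmem).2; simpa using this
      have hMr : M ∈ readings := (List.mem_filter.mp hMmem).1
      have hmax : ∀ y ∈ readings, 20 ≤ y → y ≤ M := by
        intro y hy h20
        exact PySem.List.max?_isMax hmx y (by simp [List.mem_filter, hy, h20])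
      obtain ⟨k, hk⟩ : ∃ k, PySem.List.index? readings M = some k := by
        have := (PySem.List.index?_isSome_iff _ _).mpr hMr
        cases h : PySem.List.index? readings M with
        | none => rw [h] at this; simp at this
        | some k => exact ⟨k, rfl⟩
      rw [pvLoopMain readings 0 (-1) (-1) M k hM20 (by omega) hk hmax]
      simp only [if_neg hq, hmx, hk]
      simp
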